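-- pv_equiv track=rewrite | github.com/MarcBejjani/IDPA_Project | contentQueryHelper.py | getCorpusTable
-- ===== SOURCE A (Python) =====
-- def getCorpusTable(indexingTable, hits):
--     table = {}
--     for file in hits:
--         table[file] = {}
--         for element in indexingTable:
--             if file in indexingTable[element]:
--                 table[file][element] = indexingTable[element][file]
--             else:
--                 table[file][element] = 0
--     return table
-- ===== SOURCE B (Python) =====
-- def getCorpusTable(indexingTable, hits):
--     hitset = set(hits)
--     table = {file: {element: 0 for element in indexingTable} for file in hits}
--     for element in indexingTable:
--         for file, val in indexingTable[element].items():
--             if file in hitset: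
--                 table[file][element] = val
--     return table
-- ===== Notes on version B (the rewrite author's own statement) =====
-- stated objective: alternative
-- what changed: A fills the dense file-by-element table with a membership test and branch for every (file, element) pair; B prefills an all-zero table and then makes a differently-shaped sparse overwrite pass over only the entries actually stored in the index, filtered by set(hits).
import Mathlib
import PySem

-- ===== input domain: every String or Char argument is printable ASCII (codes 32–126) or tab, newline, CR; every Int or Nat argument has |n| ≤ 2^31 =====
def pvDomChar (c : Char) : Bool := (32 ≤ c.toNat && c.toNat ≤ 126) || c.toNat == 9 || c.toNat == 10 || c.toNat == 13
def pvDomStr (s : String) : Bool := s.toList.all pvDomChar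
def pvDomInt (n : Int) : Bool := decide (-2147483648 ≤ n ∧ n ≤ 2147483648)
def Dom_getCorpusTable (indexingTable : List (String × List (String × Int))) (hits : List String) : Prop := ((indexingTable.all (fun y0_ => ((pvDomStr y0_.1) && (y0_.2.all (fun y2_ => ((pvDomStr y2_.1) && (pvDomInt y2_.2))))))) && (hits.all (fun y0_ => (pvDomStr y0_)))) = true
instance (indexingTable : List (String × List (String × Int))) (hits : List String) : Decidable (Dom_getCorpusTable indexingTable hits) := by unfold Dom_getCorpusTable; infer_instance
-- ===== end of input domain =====

-- B replaces A's dense per-(file,element) membership-test-and-branch by a zero-prefilled table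
-- plus a sparse overwrite pass over only the entries stored in the index (objective: alternative).


-- ===== PORT A =====
def getCorpusTable (indexingTable : List (String × List (String × Int))) (hits : List String) : List (String × List (String × Int)) :=
  -- table = {}; for file in hits: table[file] = {}; for element in indexingTable: …
  let table : PySem.Dict String (PySem.Dict String Int) :=
    hits.foldl (fun table file =>
      table.insert file
        (indexingTable.foldl (fun row e =>
          if (PySem.Dict.mk e.2).contains file then
            row.insert e.1 ((PySem.Dict.mk e.2).getD file 0)
          else
            row.insert e.1 0) PySem.Dict.empty)) PySem.Dict.empty
  table.items.map (fun p => (p.1, p.2.items))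

-- ===== PORT B =====
def getCorpusTable_alt (indexingTable : List (String × List (String × Int))) (hits : List String) : List (String × List (String × Int)) :=
  let hitset : PySem.Set String := PySem.Set.ofList hits
  -- table = {file: {element: 0 for element in indexingTable} for file in hits}
  let table0 : PySem.Dict String (PySem.Dict String Int) :=
    hits.foldl (fun t file =>
      t.insert file (indexingTable.foldl (fun r e => r.insert e.1 0) PySem.Dict.empty))
      PySem.Dict.empty
  -- for element in indexingTable: for file, val in indexingTable[element].items(): if file in hitset: table[file][element] = val
  -- (table[file][element] = val ported as modify: file is always a key of table since file ∈ hitset)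
  let table := indexingTable.foldl (fun t e =>
      e.2.foldl (fun t fv =>
        if PySem.Set.contains hitset fv.1 then
          t.modify fv.1 PySem.Dict.empty (fun row => row.insert e.1 fv.2)
        else t) t) table0
  table.items.map (fun p => (p.1, p.2.items))

-- ===== PRECONDITION & SPEC =====
-- Pre_ excludes association lists with duplicate keys (in the outer table or in an inner per-element
-- dict): such lists never arise from the Python dict arguments, and on them the two assoc-list
-- renderings are both accidental.
def Pre_getCorpusTable (indexingTable : List (String × List (String × Int))) (hits : List String) : Prop :=
  (indexingTable.map Prod.fst).Nodup ∧ ∀ p ∈ indexingTable, (p.2.map Prod.fst).Nodup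
instance (indexingTable : List (String × List (String × Int))) (hits : List String) : Decidable (Pre_getCorpusTable indexingTable hits) := by unfold Pre_getCorpusTable; infer_instance
def pvWitness_getCorpusTable : (List (String × List (String × Int))) × List String :=
  ([("x", [("a", 1), ("c", 2)]), ("y", [("b", 3)])], ["a", "b", "a"])
def Spec_getCorpusTable (indexingTable : List (String × List (String × Int))) (hits : List String) (out : List (String × List (String × Int))) : Prop := out = getCorpusTable_alt indexingTable hits
instance (indexingTable : List (String × List (String × Int))) (hits : List String) (out : List (String × List (String × Int))) : Decidable (Spec_getCorpusTable indexingTable hits out) := by unfold Spec_getCorpusTable; infer_instance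

-- ===== CLAIM (what is proved, stated in full; the proofs are below) =====
def Claim_equal_getCorpusTable : Prop := ∀ (indexingTable : List (String × List (String × Int))) (hits : List String), Dom_getCorpusTable indexingTable hits → Pre_getCorpusTable indexingTable hits → Spec_getCorpusTable indexingTable hits (getCorpusTable indexingTable hits)

-- ===== LEMMAS AND PROOFS =====

-- the value A stores at (file f, element e)
def pvVal (f : String) (e : String × List (String × Int)) : Int :=
  if (PySem.Dict.mk e.2).contains f then (PySem.Dict.mk e.2).getD f 0 else 0

-- the row both programs end up associating with a hit file f
def pvRowD (it : List (String × List (String × Int))) (f : String) : PySem.Dict String Int :=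
  PySem.Dict.mk (it.map (fun e => (e.1, pvVal f e)))

theorem pv_getD_foldl_insert {ν : Type} (R : String → ν) (hs : List String)
    (d : PySem.Dict String ν) (k : String) (dflt : ν) :
    (hs.foldl (fun t x => t.insert x (R x)) d).getD k dflt
      = if k ∈ hs then R k else d.getD k dflt := by
  induction hs generalizing d with
  | nil => simp
  | cons x xs ih =>
    simp only [List.foldl_cons, ih, PySem.Dict.getD_insert, List.mem_cons]
    by_cases hxs : k ∈ xs <;> by_cases hx : k = x <;> simp [hxs, hx]

theorem pv_keys_foldl_insert_empty {ν : Type} (R : String → ν) (hs : List String) :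
    (hs.foldl (fun t x => t.insert x (R x)) (PySem.Dict.empty : PySem.Dict String ν)).keys
      = PySem.Set.ofList hs := by
  rw [PySem.Dict.keys_foldl_insert hs (fun _ x => R x) PySem.Dict.empty]
  simp [PySem.Dict.keys_empty, PySem.Set.update_nil_left]

theorem pv_rowA_eq (it : List (String × List (String × Int))) (f : String)
    (ho : (it.map Prod.fst).Nodup) :
    (it.foldl (fun row e =>
        if (PySem.Dict.mk e.2).contains f then
          row.insert e.1 ((PySem.Dict.mk e.2).getD f 0)
        else
          row.insert e.1 0) PySem.Dict.empty) = pvRowD it f := by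
  have hfun : (fun (row : PySem.Dict String Int) (e : String × List (String × Int)) =>
      if (PySem.Dict.mk e.2).contains f then
        row.insert e.1 ((PySem.Dict.mk e.2).getD f 0)
      else
        row.insert e.1 0)
      = fun row e => row.insert e.1 (pvVal f e) := by
    funext row e
    simp only [pvVal, apply_ite (row.insert e.1)]
  rw [hfun]
  apply PySem.Dict.ext
  rw [PySem.Dict.items_foldl_insert_fresh it (fun e => e.1) (fun e => pvVal f e)
      PySem.Dict.empty (by intro a _; simp [PySem.Dict.contains_empty]) ho]
  simp [pvRowD, PySem.Dict.empty]

-- skipping fold: no pair of l has key f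
theorem pv_fold_skip (l : List (String × Int)) (f k : String)
    (h : ∀ fv ∈ l, fv.1 ≠ f) (row : PySem.Dict String Int) :
    l.foldl (fun row fv => if fv.1 = f then row.insert k fv.2 else row) row = row := by
  induction l generalizing row with
  | nil => rfl
  | cons a l ih =>
    have ha : a.1 ≠ f := h a (by simp)
    simp only [List.foldl_cons, if_neg ha]
    exact ih (fun fv hfv => h fv (by simp [hfv])) row

-- one element's inner pass, projected to one file f, collapses to A's conditional insert
theorem pv_inner_row (l : List (String × Int)) (f k : String)
    (hnd : (l.map Prod.fst).Nodup) (row : PySem.Dict String Int) :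
    l.foldl (fun row fv => if fv.1 = f then row.insert k fv.2 else row) row
      = if (PySem.Dict.mk l).contains f then row.insert k ((PySem.Dict.mk l).getD f 0) else row := by
  induction l generalizing row with
  | nil => simp [PySem.Dict.contains_mk]
  | cons a l ih =>
    obtain ⟨a1, a2⟩ := a
    simp only [List.map_cons, List.nodup_cons] at hnd
    by_cases ha : a1 = f
    · simp only [List.foldl_cons, if_pos ha]
      rw [pv_fold_skip l f k]
      · have hc : (PySem.Dict.mk ((a1, a2) :: l)).contains f = true := by
          simp [PySem.Dict.contains_mk, ha]
        have hg : (PySem.Dict.mk ((a1, a2) :: l)).getD f 0 = a2 := by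
          simp [PySem.Dict.getD_eq_get?_getD, PySem.Dict.get?_mk_cons, ha]
        simp [hc, hg]
      · intro fv hfv hf
        have hm := List.mem_map_of_mem (f := Prod.fst) hfv
        rw [hf, ← ha] at hm
        exact hnd.1 hm
    · simp only [List.foldl_cons, if_neg ha]
      rw [ih hnd.2 row]
      have hc : (PySem.Dict.mk ((a1, a2) :: l)).contains f = (PySem.Dict.mk l).contains f := by
        simp [PySem.Dict.contains_mk, List.any_cons, ha]
      have hg : (PySem.Dict.mk ((a1, a2) :: l)).getD f 0 = (PySem.Dict.mk l).getD f 0 := by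
        have hb : (a1 == f) = false := by simp [ha]
        simp [PySem.Dict.getD_eq_get?_getD, PySem.Dict.get?_mk_cons, hb]
      rw [hc, hg]

-- B's update fold, projected to the row of a hit file f
theorem pv_proj (it : List (String × List (String × Int))) (hits : List String)
    (f : String) (hf : f ∈ hits) (t : PySem.Dict String (PySem.Dict String Int)) :
    (it.foldl (fun t e =>
        e.2.foldl (fun t fv =>
          if PySem.Set.contains (PySem.Set.ofList hits) fv.1 then
            t.modify fv.1 PySem.Dict.empty (fun row => row.insert e.1 fv.2)
          else t) t) t).getD f PySem.Dict.empty
      = it.foldl (fun row e =>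
          e.2.foldl (fun row fv => if fv.1 = f then row.insert e.1 fv.2 else row) row)
          (t.getD f PySem.Dict.empty) := by
  induction it generalizing t with
  | nil => rfl
  | cons e it ih =>
    simp only [List.foldl_cons]
    rw [ih]
    congr 1
    induction e.2 generalizing t with
    | nil => rfl
    | cons fv l ihl =>
      simp only [List.foldl_cons]
      by_cases hm : PySem.Set.contains (PySem.Set.ofList hits) fv.1 = true
      · rw [if_pos hm, ihl]
        congr 1
        by_cases hfe : fv.1 = f
        · simp [hfe]
        · rw [if_neg hfe]
          have : ¬ (f = fv.1) := fun h => hfe h.symm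
          simp [PySem.Dict.getD_modify, this]
      · rw [if_neg hm]
        have hnf : fv.1 ≠ f := by
          intro h
          apply hm
          rw [h, PySem.Set.contains_iff, PySem.Set.mem_ofList]
          exact hf
        rw [ihl, if_neg hnf]

-- the zero-prefill then conditional overwrites over nodup keys build exactly pvRowD
theorem pv_overwrite (f : String) :
    ∀ (l : List (String × List (String × Int))) (pre : List (String × Int)),
    (l.map Prod.fst).Nodup → (∀ e ∈ l, e.1 ∉ pre.map Prod.fst) →
    l.foldl (fun row e =>
        if (PySem.Dict.mk e.2).contains f then
          row.insert e.1 ((PySem.Dict.mk e.2).getD f 0)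
        else row)
      (PySem.Dict.mk (pre ++ l.map (fun e => (e.1, (0 : Int)))))
      = PySem.Dict.mk (pre ++ l.map (fun e => (e.1, pvVal f e))) := by
  intro l
  induction l with
  | nil => intro pre _ _; simp
  | cons e l ih =>
    intro pre hnd hdis
    simp only [List.map_cons, List.nodup_cons] at hnd
    have he1l : e.1 ∉ l.map Prod.fst := hnd.1
    have hepre : e.1 ∉ pre.map Prod.fst := hdis e (by simp)
    have hstep : ∀ v : Int,
        (PySem.Dict.mk (pre ++ (e.1, (0:Int)) :: l.map (fun e => (e.1, (0:Int))))).insert e.1 v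
          = PySem.Dict.mk ((pre ++ [(e.1, v)]) ++ l.map (fun e => (e.1, (0:Int)))) := by
      intro v
      apply PySem.Dict.ext
      rw [PySem.Dict.items_insert_of_contains _ v (by simp [PySem.Dict.contains_mk])]
      show (pre ++ (e.1, (0:Int)) :: l.map (fun e => (e.1, (0:Int)))).map
          (fun p => if (p.1 == e.1) = true then (e.1, v) else p) = _
      rw [List.map_append, List.map_cons]
      have hpre : pre.map (fun p => if (p.1 == e.1) = true then (e.1, v) else p) = pre := by
        rw [List.map_congr_left (g := id), List.map_id]
        intro p hp
        have : p.1 ≠ e.1 := by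
          intro h; exact hepre (h ▸ List.mem_map_of_mem hp)
        simp [this]
      have hl : (l.map (fun e => (e.1, (0:Int)))).map
          (fun p => if (p.1 == e.1) = true then (e.1, v) else p)
            = l.map (fun e => (e.1, (0:Int))) := by
        rw [List.map_map, List.map_congr_left]
        intro a ha
        have : a.1 ≠ e.1 := by
          intro h; exact he1l (h ▸ List.mem_map_of_mem ha)
        simp [Function.comp, this]
      simp only [hpre, hl, beq_self_eq_true, if_pos]
      simp
    by_cases hc : (PySem.Dict.mk e.2).contains f = true
    · simp only [List.map_cons, List.foldl_cons, if_pos hc]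
      rw [hstep, ih (pre ++ [(e.1, (PySem.Dict.mk e.2).getD f 0)]) hnd.2]
      · have : pvVal f e = (PySem.Dict.mk e.2).getD f 0 := by simp [pvVal, hc]
        simp [this]
      · intro e' he'
        simp only [List.map_append, List.map_cons]
        intro hmem
        rcases List.mem_append.mp hmem with h | h
        · exact hdis e' (by simp [he']) h
        · simp only [List.map_nil, List.mem_cons, List.not_mem_nil, or_false] at h
          exact hnd.1 (h ▸ List.mem_map_of_mem he')
    · simp only [List.map_cons, List.foldl_cons, if_neg hc]
      have hz : (PySem.Dict.mk (pre ++ (e.1, (0:Int)) :: l.map (fun e => (e.1, (0:Int)))))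
          = PySem.Dict.mk ((pre ++ [(e.1, (0:Int))]) ++ l.map (fun e => (e.1, (0:Int)))) := by
        simp
      rw [hz, ih (pre ++ [(e.1, (0:Int))]) hnd.2]
      · have : pvVal f e = 0 := by simp [pvVal, hc]
        simp [this]
      · intro e' he'
        simp only [List.map_append, List.map_cons]
        intro hmem
        rcases List.mem_append.mp hmem with h | h
        · exact hdis e' (by simp [he']) h
        · simp only [List.map_nil, List.mem_cons, List.not_mem_nil, or_false] at h
          exact hnd.1 (h ▸ List.mem_map_of_mem he')

-- B's update fold never changes the key list (every modified key is a hit, hence already a key)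
theorem pv_keys_update (it : List (String × List (String × Int))) (hits : List String) :
    ∀ t : PySem.Dict String (PySem.Dict String Int), t.keys = PySem.Set.ofList hits →
    (it.foldl (fun t e =>
        e.2.foldl (fun t fv =>
          if PySem.Set.contains (PySem.Set.ofList hits) fv.1 then
            t.modify fv.1 PySem.Dict.empty (fun row => row.insert e.1 fv.2)
          else t) t) t).keys = PySem.Set.ofList hits := by
  induction it with
  | nil => intro t ht; exact ht
  | cons e it ih =>
    intro t ht
    simp only [List.foldl_cons]
    apply ih
    induction e.2 generalizing t with
    | nil => exact ht
    | cons fv l ihl =>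
      simp only [List.foldl_cons]
      by_cases hm : PySem.Set.contains (PySem.Set.ofList hits) fv.1 = true
      · rw [if_pos hm]
        apply ihl
        have hcon : t.contains fv.1 = true := by
          rw [PySem.Dict.contains_iff_mem_keys, ht]
          rw [PySem.Set.contains_iff] at hm
          exact hm
        rw [PySem.Dict.keys_modify, PySem.Dict.keys_insert_of_contains t _ hcon]
        exact ht
      · rw [if_neg hm]
        exact ihl t ht

-- the zero row is the all-zero literal dict
theorem pv_zero_row (it : List (String × List (String × Int)))
    (ho : (it.map Prod.fst).Nodup) :
    (it.foldl (fun (r : PySem.Dict String Int) e => r.insert e.1 0) PySem.Dict.empty)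
      = PySem.Dict.mk (it.map (fun e => (e.1, (0 : Int)))) := by
  apply PySem.Dict.ext
  rw [PySem.Dict.items_foldl_insert_fresh it (fun e => e.1) (fun _ => (0 : Int))
      PySem.Dict.empty (by intro a _; simp [PySem.Dict.contains_empty]) ho]
  simp [PySem.Dict.empty]

-- ===== VERDICT (by name: the statement is the Claim_ definition above) =====
theorem getCorpusTable_spec : Claim_equal_getCorpusTable := by
  intro it hits _ hpre
  obtain ⟨ho, hi⟩ := hpre
  unfold Spec_getCorpusTable getCorpusTable getCorpusTable_alt
  simp only []
  -- reduce to equality of the two final dictionaries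
  have hA : (hits.foldl (fun table file =>
      table.insert file
        (it.foldl (fun row e =>
          if (PySem.Dict.mk e.2).contains file then
            row.insert e.1 ((PySem.Dict.mk e.2).getD file 0)
          else
            row.insert e.1 0) PySem.Dict.empty)) PySem.Dict.empty)
      = hits.foldl (fun t f => t.insert f (pvRowD it f)) PySem.Dict.empty := by
    apply PySem.List.foldl_congr_mem
    intro t f _
    rw [pv_rowA_eq it f ho]
  rw [hA]
  set tA := hits.foldl (fun t f => t.insert f (pvRowD it f)) PySem.Dict.empty with htA
  set tB := it.foldl (fun t e =>
      e.2.foldl (fun t fv =>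
        if PySem.Set.contains (PySem.Set.ofList hits) fv.1 then
          t.modify fv.1 PySem.Dict.empty (fun row => row.insert e.1 fv.2)
        else t) t)
      (hits.foldl (fun t file =>
        t.insert file (it.foldl (fun r e => r.insert e.1 0) PySem.Dict.empty))
        PySem.Dict.empty) with htB
  have hkA : tA.keys = PySem.Set.ofList hits := by
    rw [htA]; exact pv_keys_foldl_insert_empty (pvRowD it) hits
  have hkB : tB.keys = PySem.Set.ofList hits := by
    rw [htB]
    apply pv_keys_update
    exact pv_keys_foldl_insert_empty _ hits
  have heq : tA = tB := by
    apply PySem.Dict.ext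
    rw [PySem.Dict.items_eq_map_keys tA (by rw [hkA]; exact PySem.Set.nodup_ofList hits)
          (PySem.Dict.empty : PySem.Dict String Int),
        PySem.Dict.items_eq_map_keys tB (by rw [hkB]; exact PySem.Set.nodup_ofList hits)
          (PySem.Dict.empty : PySem.Dict String Int),
        hkA, hkB]
    apply List.map_congr_left
    intro f hfset
    have hf : f ∈ hits := (PySem.Set.mem_ofList hits f).mp hfset
    have hgA : tA.getD f PySem.Dict.empty = pvRowD it f := by
      rw [htA, pv_getD_foldl_insert, if_pos hf]
    have hgB : tB.getD f PySem.Dict.empty = pvRowD it f := by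
      rw [htB, pv_proj it hits f hf, pv_getD_foldl_insert, if_pos hf,
          pv_zero_row it ho]
      have hrw : it.foldl (fun row e =>
            e.2.foldl (fun row fv => if fv.1 = f then row.insert e.1 fv.2 else row) row)
            (PySem.Dict.mk (it.map (fun e => (e.1, (0 : Int)))))
          = it.foldl (fun row e =>
              if (PySem.Dict.mk e.2).contains f then
                row.insert e.1 ((PySem.Dict.mk e.2).getD f 0)
              else row)
              (PySem.Dict.mk (it.map (fun e => (e.1, (0 : Int))))) := by
        apply PySem.List.foldl_congr_mem
        intro row e he
        exact pv_inner_row e.2 f e.1 (hi e he) row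
      rw [hrw]
      have := pv_overwrite f it [] ho (by simp)
      simpa [pvRowD] using this
    rw [hgA, hgB]
  rw [heq]
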